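-- pv_equiv track=rewrite | github.com/newliar/Experiment | test/src/read_map_json.py | get_way_ref
-- ===== SOURCE A (Python) =====
-- def get_way_ref(way):
--     # 存储way的ref值
--     way_ref = []
--     way_refs = []
--     for ele in way:
--         temp = []
--         for nd_ele in ele["nd"]:
--             for value in nd_ele.values():
--                 temp.append(value)
--                 way_refs.append(value)
--         way_ref.append(temp)
--     return way_ref, way_refs
-- ===== SOURCE B (Python) =====
-- def get_way_ref(way):
--     # Structural recursion: the result for a list is built from the head element's
--     # values and the recursive result for the tail, constructed back-to-front.
--     if not way:
--         return [], []
--     head = []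
--     for nd_ele in way[0]["nd"]:
--         head.extend(nd_ele.values())
--     rest_ref, rest_refs = get_way_ref(way[1:])
--     return [head] + rest_ref, head + rest_refs
-- ===== Notes on version B (the rewrite author's own statement) =====
-- stated objective: alternative
-- what changed: Replaces A's forward loop threading two shared accumulators with a structural recursion on the list that builds both results back-to-front from the head element's values and the recursive result of the tail.
import Mathlib
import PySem

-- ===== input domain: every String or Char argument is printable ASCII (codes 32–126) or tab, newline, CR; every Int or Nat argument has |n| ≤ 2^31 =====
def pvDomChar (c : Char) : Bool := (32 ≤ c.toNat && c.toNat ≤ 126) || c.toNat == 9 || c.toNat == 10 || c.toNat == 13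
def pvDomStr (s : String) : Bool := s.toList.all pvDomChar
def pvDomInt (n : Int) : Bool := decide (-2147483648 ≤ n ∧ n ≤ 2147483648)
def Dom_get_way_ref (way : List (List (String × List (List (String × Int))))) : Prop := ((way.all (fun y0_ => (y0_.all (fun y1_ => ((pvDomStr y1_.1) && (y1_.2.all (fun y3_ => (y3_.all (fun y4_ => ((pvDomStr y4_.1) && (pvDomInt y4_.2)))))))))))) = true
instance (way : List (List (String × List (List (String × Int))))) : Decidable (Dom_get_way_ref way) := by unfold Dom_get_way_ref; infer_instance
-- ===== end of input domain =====

-- B replaces A's forward loop threading two shared accumulators with a structural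
-- recursion building both results back-to-front; objective: alternative decomposition.

-- ===== PORT A =====
-- literal transliteration: two accumulators way_ref / way_refs, inner loops append one value at a time
def get_way_ref (way : List (List (String × List (List (String × Int))))) : List (List Int) × List Int :=
  way.foldl (fun (st : List (List Int) × List Int) ele =>
    match (PySem.Dict.ofList ele).get? "nd" with
    | none => st      -- KeyError in Python; excluded by Pre_get_way_ref
    | some nds =>
      let p := nds.foldl (fun (p : List Int × List Int) nd_ele =>
        (PySem.Dict.ofList nd_ele).values.foldl
          (fun (q : List Int × List Int) v => (q.1 ++ [v], q.2 ++ [v])) p) ([], st.2)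
      (st.1 ++ [p.1], p.2)) ([], [])

-- ===== PORT B =====
-- transliteration of Source B's structural recursion; head's values via an inner fold (extend)
def get_way_ref_alt (way : List (List (String × List (List (String × Int))))) : List (List Int) × List Int :=
  match way with
  | [] => ([], [])
  | ele :: rest =>
    -- KeyError on a missing "nd" key in Python; excluded by Pre_get_way_ref
    let head := (((PySem.Dict.ofList ele).get? "nd").getD []).foldl
      (fun (h : List Int) nd_ele => h ++ (PySem.Dict.ofList nd_ele).values) []
    let r := get_way_ref_alt rest
    ([head] ++ r.1, head ++ r.2)

-- ===== PRECONDITION & SPEC =====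
-- Pre_ excludes ways whose elements lack the "nd" key, on which Python A (and B) raise KeyError.
def Pre_get_way_ref (way : List (List (String × List (List (String × Int))))) : Prop :=
  (way.all (fun ele => ele.any (fun kv => kv.1 == "nd"))) = true
instance (way : List (List (String × List (List (String × Int))))) : Decidable (Pre_get_way_ref way) := by unfold Pre_get_way_ref; infer_instance

def pvWitness_get_way_ref : (List (List (String × List (List (String × Int))))) :=
  [[("nd", [[("ref", 1)], [("x", 2), ("y", 3)]])], [("nd", [])]]

def Spec_get_way_ref (way : List (List (String × List (List (String × Int))))) (out : List (List Int) × List Int) : Prop := out = get_way_ref_alt way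
instance (way : List (List (String × List (List (String × Int))))) (out : List (List Int) × List Int) : Decidable (Spec_get_way_ref way out) := by unfold Spec_get_way_ref; infer_instance

-- ===== CLAIM (what is proved, stated in full; the proofs are below) =====
def Claim_equal_get_way_ref : Prop := ∀ (way : List (List (String × List (List (String × Int))))), Dom_get_way_ref way → Pre_get_way_ref way → Spec_get_way_ref way (get_way_ref way)

-- ===== LEMMAS AND PROOFS =====

-- the value list of one element, as a closed form both ports reach
def pvFlatOf (ele : List (String × List (List (String × Int)))) : List Int :=
  (((PySem.Dict.ofList ele).get? "nd").getD []).flatMap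
    (fun nd_ele => (PySem.Dict.ofList nd_ele).values)

theorem pv_head_fold (nds : List (List (String × Int))) (h : List Int) :
    nds.foldl (fun (h : List Int) nd_ele => h ++ (PySem.Dict.ofList nd_ele).values) h
      = h ++ nds.flatMap (fun nd_ele => (PySem.Dict.ofList nd_ele).values) := by
  induction nds generalizing h with
  | nil => simp
  | cons nd nds ih => simp [List.foldl, ih]

theorem pv_alt_closed (way : List (List (String × List (List (String × Int))))) :
    get_way_ref_alt way = (way.map pvFlatOf, (way.map pvFlatOf).flatten) := by
  induction way with
  | nil => rfl
  | cons ele rest ih =>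
    simp only [get_way_ref_alt, ih, pv_head_fold, List.nil_append]
    simp [pvFlatOf]

theorem pv_inner_vals (vs : List Int) (p : List Int × List Int) :
    vs.foldl (fun (q : List Int × List Int) v => (q.1 ++ [v], q.2 ++ [v])) p
      = (p.1 ++ vs, p.2 ++ vs) := by
  induction vs generalizing p with
  | nil => simp
  | cons v vs ih => simp [List.foldl, ih]

theorem pv_inner (nds : List (List (String × Int))) (p : List Int × List Int) :
    nds.foldl (fun (p : List Int × List Int) nd_ele =>
        (PySem.Dict.ofList nd_ele).values.foldl
          (fun (q : List Int × List Int) v => (q.1 ++ [v], q.2 ++ [v])) p) p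
      = (p.1 ++ nds.flatMap (fun nd_ele => (PySem.Dict.ofList nd_ele).values),
         p.2 ++ nds.flatMap (fun nd_ele => (PySem.Dict.ofList nd_ele).values)) := by
  induction nds generalizing p with
  | nil => simp
  | cons nd nds ih =>
    rw [List.foldl_cons, pv_inner_vals, ih]
    simp

theorem pv_contains_update {α : Type} (l : List (String × α)) (d : PySem.Dict String α) (k : String) :
    (d.update l).contains k = (d.contains k || l.any (fun p => p.1 == k)) := by
  induction l generalizing d with
  | nil => simp [PySem.Dict.update]
  | cons p l ih =>
    simp only [PySem.Dict.update, List.foldl] at ih ⊢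
    rw [ih, PySem.Dict.contains_insert]
    have hc : (k == p.1) = (p.1 == k) := by simp [eq_comm]
    rw [hc]
    simp only [List.any_cons]
    cases (p.1 == k) <;> cases d.contains k <;> simp

theorem pv_get?_ofList_isSome {α : Type} (l : List (String × α)) (k : String)
    (h : l.any (fun p => p.1 == k) = true) :
    ((PySem.Dict.ofList l).get? k).isSome = true := by
  rw [← PySem.Dict.contains_eq_isSome_get?]
  simp only [PySem.Dict.ofList, pv_contains_update, PySem.Dict.contains_empty, Bool.false_or]
  exact h

theorem pv_outer (way : List (List (String × List (List (String × Int)))))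
    (acc : List (List Int) × List Int)
    (h : Pre_get_way_ref way) :
    way.foldl (fun (st : List (List Int) × List Int) ele =>
      match (PySem.Dict.ofList ele).get? "nd" with
      | none => st
      | some nds =>
        let p := nds.foldl (fun (p : List Int × List Int) nd_ele =>
          (PySem.Dict.ofList nd_ele).values.foldl
            (fun (q : List Int × List Int) v => (q.1 ++ [v], q.2 ++ [v])) p) ([], st.2)
        (st.1 ++ [p.1], p.2)) acc
      = (acc.1 ++ way.map pvFlatOf, acc.2 ++ (way.map pvFlatOf).flatten) := by
  induction way generalizing acc with
  | nil => simp
  | cons ele way ih =>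
    unfold Pre_get_way_ref at h
    simp only [List.all_cons, Bool.and_eq_true] at h
    obtain ⟨h1, h2⟩ := h
    have hs := pv_get?_ofList_isSome ele "nd" h1
    obtain ⟨nds, hk⟩ := Option.isSome_iff_exists.mp hs
    simp only [List.foldl, hk]
    rw [ih _ h2, pv_inner]
    simp [pvFlatOf, hk]

-- ===== VERDICT (by name: the statement is the Claim_ definition above) =====
theorem get_way_ref_spec : Claim_equal_get_way_ref := by
  intro way _ hpre
  unfold Spec_get_way_ref get_way_ref
  rw [pv_outer way ([], []) hpre, pv_alt_closed]
  simp
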